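-- pv_equiv track=rewrite | github.com/padresmurfa/yapl | v4/lexer/shared/tokenized_lines/builder.py | basic_type
-- ===== SOURCE A (Python) =====
-- def _specific_keyword(k, logical_line_contents, tokens):
--     kw = k + " "
--     if logical_line_contents == k or logical_line_contents.startswith(kw):
--         logical_line_contents = logical_line_contents[len(kw):]
--         tokens.append({
--             "token": "KEYWORD",
--             "value": k.upper()
--         })
--     return logical_line_contents
--
-- def basic_type(logical_line_contents, tokens):
--     for k in (
--             "string", "boolean", "integer", "float", "character", "bytes"
--     ):
--         before = logical_line_contents
--         after = _specific_keyword(k, logical_line_contents, tokens)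
--         if before != after:
--             tokens[-1]["token"] = "BASIC_TYPE"
--             logical_line_contents = after
--             break
--     return logical_line_contents
-- ===== SOURCE B (Python) =====
-- _BASIC_TYPES = {"string", "boolean", "integer", "float", "character", "bytes"}
--
-- def basic_type(logical_line_contents, tokens):
--     i = logical_line_contents.find(" ")
--     word = logical_line_contents if i == -1 else logical_line_contents[:i]
--     if word in _BASIC_TYPES:
--         tokens.append({"token": "BASIC_TYPE", "value": word.upper()})
--         logical_line_contents = logical_line_contents[len(word) + 1:]
--     return logical_line_contents
-- ===== Notes on version B (the rewrite author's own statement) =====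
-- stated objective: idiomatic
-- what changed: B extracts the first space-delimited word once and does a single membership test against a set of the six basic-type keywords, replacing A's loop that tries a prefix-match helper for each keyword in turn and its break/retag dance.
import Mathlib
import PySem

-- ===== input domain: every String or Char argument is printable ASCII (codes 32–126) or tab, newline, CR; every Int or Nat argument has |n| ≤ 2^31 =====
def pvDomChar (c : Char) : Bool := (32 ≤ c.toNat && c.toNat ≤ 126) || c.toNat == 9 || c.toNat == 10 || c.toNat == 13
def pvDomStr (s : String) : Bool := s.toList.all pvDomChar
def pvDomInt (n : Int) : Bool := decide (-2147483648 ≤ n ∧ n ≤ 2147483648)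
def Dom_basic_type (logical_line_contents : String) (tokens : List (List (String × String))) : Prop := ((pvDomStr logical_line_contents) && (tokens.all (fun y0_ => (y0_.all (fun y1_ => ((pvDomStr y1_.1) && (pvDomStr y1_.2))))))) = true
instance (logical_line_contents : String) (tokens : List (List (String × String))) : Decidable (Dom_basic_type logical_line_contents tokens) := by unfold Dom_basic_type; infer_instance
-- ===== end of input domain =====

-- B replaces A's six-keyword prefix-scan loop by extracting the first space-delimited word once and
-- one set-membership test (objective: idiomatic). Both Pythons append the same token dict to `tokens`
-- (A appends then retags it; B appends it retagged — same net mutation); the equivalence proved here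
-- is about the RETURN value. String work is done on List Char (PySem convention).

-- ===== PORT A =====
-- _specific_keyword's tokens.append changes only `tokens`, never the returned string; the port
-- returns the new line contents (the function's return value).
def pvSpecificKeyword (k : List Char) (cs : List Char) : List Char :=
  let kw := k ++ [' ']
  if cs == k || PySem.Chars.startswith cs kw then
    PySem.List.slice cs (some (kw.length : Int)) none
  else cs

-- the `for k in (...)` loop with its `break`: `tokens[-1]["token"] = "BASIC_TYPE"` only retags the
-- appended dict and does not touch the returned string
def pvBasicLoop (ks : List (List Char)) (cs : List Char) : List Char :=
  match ks with
  | [] => cs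
  | k :: rest =>
      let after := pvSpecificKeyword k cs
      if cs == after then pvBasicLoop rest cs else after

def pvKeywordsA : List (List Char) :=
  ["string".toList, "boolean".toList, "integer".toList, "float".toList, "character".toList, "bytes".toList]

def basic_type (logical_line_contents : String) (tokens : List (List (String × String))) : String :=
  String.ofList (pvBasicLoop pvKeywordsA logical_line_contents.toList)

-- ===== PORT B =====
def pvBasicTypesB : List (List Char) :=
  ["string".toList, "boolean".toList, "integer".toList, "float".toList, "character".toList, "bytes".toList]

def basic_type_alt (logical_line_contents : String) (tokens : List (List (String × String))) : String :=
  let cs := logical_line_contents.toList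
  let i := PySem.Chars.find cs [' ']
  let word := if i == -1 then cs else PySem.List.slice cs none (some i)
  if word ∈ pvBasicTypesB then
    String.ofList (PySem.List.slice cs (some ((word.length : Int) + 1)) none)
  else logical_line_contents

-- ===== PRECONDITION & SPEC =====
def Spec_basic_type (logical_line_contents : String) (tokens : List (List (String × String))) (out : String) : Prop := out = basic_type_alt logical_line_contents tokens
instance (logical_line_contents : String) (tokens : List (List (String × String))) (out : String) : Decidable (Spec_basic_type logical_line_contents tokens out) := by unfold Spec_basic_type; infer_instance

-- ===== CLAIM (what is proved, stated in full; the proofs are below) =====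
def Claim_equal_basic_type : Prop := ∀ (logical_line_contents : String) (tokens : List (List (String × String))), Dom_basic_type logical_line_contents tokens → Spec_basic_type logical_line_contents tokens (basic_type logical_line_contents tokens)

-- ===== LEMMAS AND PROOFS =====

-- the first space-delimited word of cs
def pvW (cs : List Char) : List Char := cs.takeWhile (· ≠ ' ')

lemma pvFindGo_space (cs : List Char) (n : Nat) :
    PySem.Chars.find.go [' '] cs n =
      if ' ' ∈ cs then ((n : Int) + (pvW cs).length) else -1 := by
  induction cs generalizing n with
  | nil => simp [PySem.Chars.find.go]
  | cons c t ih =>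
      by_cases hc : c = ' '
      · subst hc; simp [PySem.Chars.find.go, List.isPrefixOf, pvW]
      · have hne : ¬ (' ' = c) := fun h => hc h.symm
        by_cases hm : ' ' ∈ t
        · simp [PySem.Chars.find.go, List.isPrefixOf, hc, hne, ih (n+1), hm, pvW]
          ring
        · simp [PySem.Chars.find.go, List.isPrefixOf, hc, hne, ih (n+1), hm, pvW]

lemma pvFind_space (cs : List Char) :
    PySem.Chars.find cs [' '] = if ' ' ∈ cs then ((pvW cs).length : Int) else -1 := by
  have := pvFindGo_space cs 0
  simpa [PySem.Chars.find] using this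

lemma pvW_eq_self (cs : List Char) (h : ' ' ∉ cs) : pvW cs = cs := by
  simp [pvW, List.takeWhile_eq_self_iff]
  intro a ha hsp; exact h (hsp ▸ ha)

-- B's extracted word is exactly pvW
lemma pvWord_eq (cs : List Char) :
    (if (PySem.Chars.find cs [' ']) == -1 then cs
     else PySem.List.slice cs none (some (PySem.Chars.find cs [' ']))) = pvW cs := by
  rw [pvFind_space]
  by_cases hm : ' ' ∈ cs
  · simp only [hm, if_true]
    rw [beq_eq_false_iff_ne.mpr (by omega : ((pvW cs).length : Int) ≠ -1)]
    simp only [Bool.false_eq_true, if_false]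
    rw [PySem.List.slice_to_natCast]
    exact (List.prefix_iff_eq_take.mp (List.takeWhile_prefix _)).symm
  · simp [hm, pvW_eq_self cs hm]

lemma pvW_cons_of_ne (c : Char) (t : List Char) (hc : c ≠ ' ') :
    pvW (c :: t) = c :: pvW t := by
  simp [pvW, hc]

lemma pvW_append_space (k r : List Char) (hk : ' ' ∉ k) : pvW (k ++ ' ' :: r) = k := by
  induction k with
  | nil => simp [pvW]
  | cons c t ih =>
      have hc : c ≠ ' ' := fun h => hk (by simp [h])
      rw [List.cons_append, pvW_cons_of_ne _ _ hc, ih (fun h => hk (by simp [h]))]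

-- every string is its first word, or its first word, a space, and a remainder
lemma pvW_split (cs : List Char) : cs = pvW cs ∨ ∃ r, cs = pvW cs ++ ' ' :: r := by
  induction cs with
  | nil => left; rfl
  | cons c t ih =>
      by_cases hc : c = ' '
      · subst hc; right; exact ⟨t, by simp [pvW]⟩
      · rcases ih with h | ⟨r, hr⟩
        · left; rw [pvW_cons_of_ne _ _ hc, ← h]
        · right; exact ⟨r, by rw [pvW_cons_of_ne _ _ hc, List.cons_append, ← hr]⟩

-- A's match condition for a space-free nonempty keyword k holds iff the first word is k
lemma pvCond_iff (k cs : List Char) (hk : ' ' ∉ k) :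
    (cs == k || PySem.Chars.startswith cs (k ++ [' '])) = true ↔ pvW cs = k := by
  constructor
  · intro h
    rcases Bool.or_eq_true_iff.mp h with h | h
    · have : cs = k := by simpa using h
      subst this; exact pvW_eq_self cs hk
    · rcases (PySem.Chars.startswith_iff cs (k ++ [' '])).mp h with ⟨r, hr⟩
      subst hr
      simpa using pvW_append_space k r hk
  · intro h
    rcases pvW_split cs with hcs | ⟨r, hr⟩
    · apply Bool.or_eq_true_iff.mpr; left
      rw [beq_iff_eq, hcs, h]
    · apply Bool.or_eq_true_iff.mpr; right
      apply (PySem.Chars.startswith_iff cs (k ++ [' '])).mpr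
      exact ⟨r, by rw [hr, h]; simp⟩

lemma pvSliceDrop (cs : List Char) (n : Nat) :
    PySem.List.slice cs (some ((n : Int) + 1)) none = cs.drop (n + 1) := by
  have : ((n : Int) + 1) = ((n + 1 : Nat) : Int) := by push_cast; ring
  rw [this, PySem.List.slice_from_natCast]

-- A's loop computes: drop the first word and the space if the word is a listed keyword
lemma pvLoop_eq (ks : List (List Char)) (cs : List Char)
    (hks : ∀ k ∈ ks, k ≠ [] ∧ ' ' ∉ k) :
    pvBasicLoop ks cs = if pvW cs ∈ ks then cs.drop ((pvW cs).length + 1) else cs := by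
  induction ks with
  | nil => simp [pvBasicLoop]
  | cons k rest ih =>
      obtain ⟨hne, hsp⟩ := hks k (by simp)
      by_cases h : pvW cs = k
      · have hcond : (cs == k || PySem.Chars.startswith cs (k ++ [' '])) = true :=
          (pvCond_iff k cs hsp).mpr h
        have hcs : cs ≠ [] := by
          intro hnil; subst hnil
          simp [pvW] at h; exact hne h
        have hafter : pvSpecificKeyword k cs = cs.drop (k.length + 1) := by
          simp only [pvSpecificKeyword, hcond, if_true]
          have : ((k ++ [' ']).length : Int) = ((k.length : Int) + 1) := by simp
          rw [this, pvSliceDrop]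
        have hlt : (cs.drop (k.length + 1)).length < cs.length := by
          have : 0 < cs.length := List.length_pos_iff.mpr hcs
          simp [List.length_drop]; omega
        have hneq : (cs == cs.drop (k.length + 1)) = false := by
          rw [beq_eq_false_iff_ne]
          intro he; rw [← he] at hlt; omega
        simp [pvBasicLoop, hafter, hneq, h]
      · have hcond : (cs == k || PySem.Chars.startswith cs (k ++ [' '])) = false := by
          rw [Bool.eq_false_iff]
          intro hc; exact h ((pvCond_iff k cs hsp).mp hc)
        have hafter : pvSpecificKeyword k cs = cs := by
          simp [pvSpecificKeyword, hcond]
        rw [pvBasicLoop, hafter]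
        simp only [BEq.rfl, if_true]
        rw [ih (fun x hx => hks x (by simp [hx]))]
        by_cases hr : pvW cs ∈ rest <;> simp [h, hr]

lemma pvKeywords_wf : ∀ k ∈ pvKeywordsA, k ≠ [] ∧ ' ' ∉ k := by decide

-- ===== VERDICT (by name: the statement is the Claim_ definition above) =====
theorem basic_type_spec : Claim_equal_basic_type := by
  intro line tokens _
  unfold Spec_basic_type basic_type
  simp only [basic_type_alt]
  rw [pvWord_eq line.toList, pvLoop_eq pvKeywordsA line.toList pvKeywords_wf]
  by_cases hm : pvW line.toList ∈ pvBasicTypesB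
  · have hmA : pvW line.toList ∈ pvKeywordsA := hm
    simp only [hm, hmA, if_true]
    rw [pvSliceDrop]
  · have hmA : pvW line.toList ∉ pvKeywordsA := hm
    simp only [hm, hmA, if_false]
    exact String.ofList_toList
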